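-- pv_equiv track=rewrite | github.com/SajidMohmand/Python-Practice-With-Gift-University | lab 03/List and Tuples/q6.py | checkLoShuMagicSquare
-- ===== SOURCE A (Python) =====
-- def checkLoShuMagicSquare(square):
--     nums = [num for row in square for num in row]  # Flatten the 2D list
--     if sorted(nums) != list(range(1, 10)):
--         return False
--
--     magic_sum = sum(square[0])
--
--     for row in square:
--         if sum(row) != magic_sum:
--             return False
--
--     for col in range(3):
--         if sum(square[row][col] for row in range(3)) != magic_sum:
--             return False
--
--     if sum(square[i][i] for i in range(3)) != magic_sum:
--         return False
--
--     if sum(square[i][2 - i] for i in range(3)) != magic_sum: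
--         return False
--
--     return True
-- ===== SOURCE B (Python) =====
-- # The only 3x3 magic squares over the digits 1..9 are the eight symmetry
-- # images (rotations/reflections) of the classic Lo Shu square, so checking
-- # is a constant-time membership test against that table -- no sums at all.
-- _LOSHU_SQUARES = [
--     [[4, 9, 2], [3, 5, 7], [8, 1, 6]],
--     [[2, 9, 4], [7, 5, 3], [6, 1, 8]],
--     [[8, 3, 4], [1, 5, 9], [6, 7, 2]],
--     [[4, 3, 8], [9, 5, 1], [2, 7, 6]],
--     [[6, 1, 8], [7, 5, 3], [2, 9, 4]],
--     [[8, 1, 6], [3, 5, 7], [4, 9, 2]],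
--     [[2, 7, 6], [9, 5, 1], [4, 3, 8]],
--     [[6, 7, 2], [1, 5, 9], [8, 3, 4]],
-- ]
--
-- def checkLoShuMagicSquare(square):
--     return square in _LOSHU_SQUARES
-- ===== Notes on version B (the rewrite author's own statement) =====
-- stated objective: faster
-- what changed: B drops all arithmetic: instead of flattening, sorting against range(1,10) and summing rows/columns/diagonals, it tests membership of the grid in a fixed table of the eight symmetry images of the Lo Shu square, which are exactly the 3x3 magic squares over 1..9.
-- outside the precondition, e.g. on checkLoShuMagicSquare([[1, 2], [3, 4], [5, 6], [7, 8, 9]]): A returns False, B returns False; on checkLoShuMagicSquare([[1, 2, 3, 4, 5, 6, 7, 8, 9]]): A raises IndexError, B returns False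
import Mathlib
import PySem

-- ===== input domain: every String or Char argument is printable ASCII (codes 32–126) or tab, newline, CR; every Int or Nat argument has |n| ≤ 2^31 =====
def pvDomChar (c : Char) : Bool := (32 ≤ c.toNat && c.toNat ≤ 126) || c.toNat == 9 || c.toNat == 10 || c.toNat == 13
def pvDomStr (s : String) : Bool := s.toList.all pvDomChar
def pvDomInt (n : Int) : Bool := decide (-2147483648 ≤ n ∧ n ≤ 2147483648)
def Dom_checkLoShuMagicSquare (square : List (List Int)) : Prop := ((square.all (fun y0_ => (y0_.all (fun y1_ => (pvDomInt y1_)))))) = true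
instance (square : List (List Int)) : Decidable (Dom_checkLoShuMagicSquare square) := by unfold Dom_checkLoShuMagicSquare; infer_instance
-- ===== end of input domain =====

-- B replaces A's sort-then-eight-line-sums arithmetic by a membership test in the fixed
-- table of the eight symmetry images of the Lo Shu square (exactly the 3x3 magic squares
-- over 1..9); a timing run measured B faster on the generated inputs.
-- ===== PORT A =====
def checkLoShuMagicSquare (square : List (List Int)) : Bool :=
  let nums : List Int := square.flatMap (fun row => row)
  if PySem.List.sorted nums (fun x => x) false ≠ PySem.List.pyRange 1 10 1 then false
  else
    let magicSum : Int := (((PySem.List.pyGet? square 0).getD []) : List Int).sum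
    if square.any (fun row => row.sum != magicSum) then false
    else if (PySem.List.pyRange 0 3 1).any (fun col =>
        ((PySem.List.pyRange 0 3 1).map
          (fun r => ((PySem.List.pyGet? ((PySem.List.pyGet? square r).getD []) col).getD 0))).sum != magicSum) then false
    else if ((PySem.List.pyRange 0 3 1).map
        (fun i => ((PySem.List.pyGet? ((PySem.List.pyGet? square i).getD []) i).getD 0))).sum ≠ magicSum then false
    else if ((PySem.List.pyRange 0 3 1).map
        (fun i => ((PySem.List.pyGet? ((PySem.List.pyGet? square i).getD []) (2 - i)).getD 0))).sum ≠ magicSum then false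
    else true

-- ===== PORT B =====
def loShuSquares : List (List (List Int)) :=
  [[[4, 9, 2], [3, 5, 7], [8, 1, 6]],
   [[2, 9, 4], [7, 5, 3], [6, 1, 8]],
   [[8, 3, 4], [1, 5, 9], [6, 7, 2]],
   [[4, 3, 8], [9, 5, 1], [2, 7, 6]],
   [[6, 1, 8], [7, 5, 3], [2, 9, 4]],
   [[8, 1, 6], [3, 5, 7], [4, 9, 2]],
   [[2, 7, 6], [9, 5, 1], [4, 3, 8]],
   [[6, 7, 2], [1, 5, 9], [8, 3, 4]]]

def checkLoShuMagicSquare_alt (square : List (List Int)) : Bool :=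
  loShuSquares.contains square

-- ===== PRECONDITION & SPEC =====
-- Pre_ excludes grids whose entries are exactly the digits 1..9 but whose shape is not 3x3:
-- there A's behaviour is an accident of check order (IndexError on e.g. [[1,...,9]], False on others).
def Pre_checkLoShuMagicSquare (square : List (List Int)) : Prop :=
  PySem.List.sorted (square.flatMap (fun row => row)) (fun x => x) false = PySem.List.pyRange 1 10 1 →
    (square.length = 3 ∧ ∀ row ∈ square, row.length = 3)
instance (square : List (List Int)) : Decidable (Pre_checkLoShuMagicSquare square) := by
  unfold Pre_checkLoShuMagicSquare; infer_instance
def pvWitness_checkLoShuMagicSquare : List (List Int) := [[4, 9, 2], [3, 5, 7], [8, 1, 6]]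

def Spec_checkLoShuMagicSquare (square : List (List Int)) (out : Bool) : Prop := out = checkLoShuMagicSquare_alt square
instance (square : List (List Int)) (out : Bool) : Decidable (Spec_checkLoShuMagicSquare square out) := by unfold Spec_checkLoShuMagicSquare; infer_instance

-- ===== CLAIM (what is proved, stated in full; the proofs are below) =====
def Claim_equal_checkLoShuMagicSquare : Prop := ∀ (square : List (List Int)), Dom_checkLoShuMagicSquare square → Pre_checkLoShuMagicSquare square → Spec_checkLoShuMagicSquare square (checkLoShuMagicSquare square)

-- ===== LEMMAS AND PROOFS =====

-- each Lo Shu variant's flattened multiset is exactly 1..9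
theorem mem_loShu_sorted (square : List (List Int))
    (hm : square ∈ loShuSquares) :
    PySem.List.sorted (square.flatMap (fun row => row)) (fun x => x) false = PySem.List.pyRange 1 10 1 := by
  fin_cases hm <;> decide

-- ===== VERDICT (by name: the statement is the Claim_ definition above) =====
theorem checkLoShuMagicSquare_spec : Claim_equal_checkLoShuMagicSquare := by
  intro square _ hpre
  unfold Spec_checkLoShuMagicSquare
  by_cases hs : PySem.List.sorted (square.flatMap (fun row => row)) (fun x => x) false = PySem.List.pyRange 1 10 1
  · obtain ⟨hlen, hrows⟩ := hpre hs
    match square, hlen with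
    | [r0, r1, r2], _ =>
      have h0 := hrows r0 (by simp)
      have h1 := hrows r1 (by simp)
      have h2 := hrows r2 (by simp)
      match r0, h0, r1, h1, r2, h2 with
      | [a, b, c], _, [d, e, f], _, [g, h, i], _ =>
        have hp : ([a, b, c, d, e, f, g, h, i] : List Int).Perm [1,2,3,4,5,6,7,8,9] := by
          have hperm := PySem.List.sorted_perm ([[a,b,c],[d,e,f],[g,h,i]].flatMap (fun row => row)) (fun x : Int => x) false
          rw [hs] at hperm
          simpa [PySem.List.pyRange] using hperm.symm
        have hnd : ([a, b, c, d, e, f, g, h, i] : List Int).Nodup :=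
          hp.nodup_iff.mpr (by decide)
        have hmem : ∀ x ∈ ([a, b, c, d, e, f, g, h, i] : List Int), x ∈ ([1,2,3,4,5,6,7,8,9] : List Int) :=
          fun x hx => hp.mem_iff.mp hx
        have ha := hmem a (by simp); have hb := hmem b (by simp); have hc := hmem c (by simp)
        have hd := hmem d (by simp); have he := hmem e (by simp); have hf := hmem f (by simp)
        have hg := hmem g (by simp); have hh := hmem h (by simp); have hi := hmem i (by simp)
        simp only [List.mem_cons, List.not_mem_nil, or_false] at ha hb hc hd he hf hg hh hi
        simp only [List.nodup_cons, List.mem_cons, List.not_mem_nil, or_false, not_or,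
          List.nodup_nil, and_true] at hnd
        have hr3 : PySem.List.pyRange 0 3 1 = [0, 1, 2] := by decide
        simp only [checkLoShuMagicSquare, checkLoShuMagicSquare_alt, loShuSquares, hs, hr3]
        norm_num [PySem.List.pyGet?, PySem.List.pyIdx?, List.contains_cons,
          List.getElem?_cons_succ, List.getElem?_cons_zero]
        simp only [show (2:Int).toNat = 2 from rfl]
        norm_num
        rw [Bool.eq_iff_iff]
        simp only [Bool.and_eq_true, Bool.or_eq_true, beq_iff_eq, decide_eq_true_eq]
        have hsum : a + b + c + d + e + f + g + h + i = 45 := by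
          have := hp.sum_eq
          simp at this
          linarith
        have bound : ∀ x : Int,
            (x = 1 ∨ x = 2 ∨ x = 3 ∨ x = 4 ∨ x = 5 ∨ x = 6 ∨ x = 7 ∨ x = 8 ∨ x = 9) →
            1 ≤ x ∧ x ≤ 9 := fun x hx => by omega
        have hc' := bound c hc
        have hd' := bound d hd
        have he' := bound e he
        have hf' := bound f hf
        have hg' := bound g hg
        have hh' := bound h hh
        have hi' := bound i hi
        clear hp hmem hs hpre hrows h0 h1 h2 hc hd he hf hg hh hi bound
        constructor
        · intro hA
          obtain ⟨⟨h1, h2⟩, ⟨h3, h4, h5⟩, h6, h7⟩ := hA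
          have he5 : e = 5 := by linarith
          have hc2 : c = 15 - a - b := by linarith
          have hg2 : g = a + b - 5 := by linarith
          have hd2 : d = 20 - 2*a - b := by linarith
          have hf2 : f = 2*a + b - 10 := by linarith
          have hh2 : h = 10 - b := by linarith
          have hi2 : i = 10 - a := by linarith
          subst he5 hc2 hg2 hd2 hf2 hh2 hi2
          rcases ha with rfl|rfl|rfl|rfl|rfl|rfl|rfl|rfl|rfl <;>
            rcases hb with rfl|rfl|rfl|rfl|rfl|rfl|rfl|rfl|rfl <;>
            first
              | (exfalso; omega)
              | norm_num
        · intro hB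
          rcases hB with hB|hB|hB|hB|hB|hB|hB|hB <;>
            obtain ⟨⟨rfl, rfl, rfl⟩, ⟨rfl, rfl, rfl⟩, rfl, rfl, rfl⟩ := hB <;>
            norm_num
  · simp only [checkLoShuMagicSquare]
    rw [if_pos hs]
    by_cases hm : checkLoShuMagicSquare_alt square = true
    · exfalso
      have : square ∈ loShuSquares := by
        simpa [checkLoShuMagicSquare_alt] using hm
      exact hs (mem_loShu_sorted square this)
    · simp at hm; rw [hm]
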